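-- pv_equiv track=rewrite | github.com/jnsrikanth/mq-hackathon-2026 | mq-hackathon-2026/transformer/analyzer.py | edges_to_dot
-- ===== SOURCE A (Python) =====
-- def edges_to_dot(edges: list[tuple[str, str, str]]) -> str:
--     """Build a Graphviz DOT string from edge tuples.
--
--     QM_ prefixed nodes are rendered as boxes; others as ellipses.
--     """
--     nodes_qm: set[str] = set()
--     nodes_app: set[str] = set()
--
--     for s, d, _rel in edges:
--         (nodes_qm if s.startswith("QM_") else nodes_app).add(s)
--         (nodes_qm if d.startswith("QM_") else nodes_app).add(d)
--
--     lines: list[str] = [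
--         "digraph MQ {",
--         "  rankdir=LR;",
--         '  node [fontsize=9];',
--     ]
--
--     if nodes_qm:
--         labels = " ".join(f'"{n}"' for n in sorted(nodes_qm))
--         lines.append(
--             f'  {{ node [shape=box, style=filled, fillcolor="#F0F6FF"]; {labels}; }}'
--         )
--
--     if nodes_app:
--         labels = " ".join(f'"{n}"' for n in sorted(nodes_app))
--         lines.append(
--             f'  {{ node [shape=ellipse, style=filled, fillcolor="#FCF5FF"]; {labels}; }}'
--         )
--
--     for s, d, rel in sorted(edges):
--         color = "#1F6FEB" if rel == "writes_to" else "#7D4AEA"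
--         lines.append(f'  "{s}" -> "{d}" [label="{rel}", color="{color}"];')
--
--     lines.append("}")
--     return "\n".join(lines)
-- ===== SOURCE B (Python) =====
-- def edges_to_dot(edges: list[tuple[str, str, str]]) -> str:
--     """Build a Graphviz DOT string from edge tuples.
--
--     No sets: every endpoint (with duplicates) goes into one list, which is
--     sorted; a single scan skips adjacent duplicates and routes each fresh
--     node's quoted label to the box or ellipse group.  The result string is
--     grown by direct concatenation instead of joining a list of lines.
--     """
--     endpoints = sorted(n for s, d, _rel in edges for n in (s, d))
--
--     box: list[str] = []
--     ell: list[str] = []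
--     prev = None
--     for n in endpoints:
--         if n != prev:
--             (box if n.startswith("QM_") else ell).append(f'"{n}"')
--             prev = n
--
--     out = "digraph MQ {\n  rankdir=LR;\n  node [fontsize=9];"
--     if box:
--         out += '\n  { node [shape=box, style=filled, fillcolor="#F0F6FF"]; ' + " ".join(box) + "; }"
--     if ell:
--         out += '\n  { node [shape=ellipse, style=filled, fillcolor="#FCF5FF"]; ' + " ".join(ell) + "; }"
--     for s, d, rel in sorted(edges):
--         color = "#1F6FEB" if rel == "writes_to" else "#7D4AEA"
--         out += f'\n  "{s}" -> "{d}" [label="{rel}", color="{color}"];'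
--     return out + "\n}"
-- ===== Notes on version B (the rewrite author's own statement) =====
-- stated objective: alternative
-- what changed: B uses no sets at all: it collects every endpoint (with duplicates) into one list, sorts it, and a single scan skips adjacent duplicates while routing each fresh quoted node to the box or ellipse group, and it grows the output string by direct concatenation instead of joining a list of lines.
import Mathlib
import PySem

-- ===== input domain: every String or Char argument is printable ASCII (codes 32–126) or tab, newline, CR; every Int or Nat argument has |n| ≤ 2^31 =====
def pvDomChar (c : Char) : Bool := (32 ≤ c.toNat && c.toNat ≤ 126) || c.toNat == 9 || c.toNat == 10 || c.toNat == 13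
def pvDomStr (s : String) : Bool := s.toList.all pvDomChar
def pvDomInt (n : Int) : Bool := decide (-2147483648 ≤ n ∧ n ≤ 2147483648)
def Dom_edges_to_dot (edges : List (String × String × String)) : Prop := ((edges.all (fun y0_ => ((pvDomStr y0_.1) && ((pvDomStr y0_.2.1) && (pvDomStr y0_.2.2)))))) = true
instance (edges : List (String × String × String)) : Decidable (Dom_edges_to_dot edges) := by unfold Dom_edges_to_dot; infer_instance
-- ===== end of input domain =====

-- B uses no sets: all endpoints (with duplicates) are sorted once and a single scan skips
-- adjacent duplicates while partitioning quoted labels; the output string is grown by direct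
-- concatenation instead of joining a list of lines (objective: alternative; return value only).

-- shared vocabulary of both Pythons (identical source lines in Source A and Source B)
def pvIsQM (n : String) : Bool := PySem.Str.startswith n "QM_"

def pvQuote (n : String) : String := "\"" ++ n ++ "\""

-- Python tuple comparison on (s, d, rel) is the lexicographic order
def pvEdgeKey (e : String × String × String) : Lex (String × Lex (String × String)) :=
  toLex (e.1, toLex (e.2.1, e.2.2))

-- the edge-formatting loop body, identical in Source A and Source B
def pvEdgeLine (e : String × String × String) : String :=
  let color := if e.2.2 = "writes_to" then "#1F6FEB" else "#7D4AEA"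
  "  \"" ++ e.1 ++ "\" -> \"" ++ e.2.1 ++ "\" [label=\"" ++ e.2.2 ++ "\", color=\"" ++ color ++ "\"];"

-- ===== PORT A =====
def pvHeader : List String := ["digraph MQ {", "  rankdir=LR;", "  node [fontsize=9];"]

def pvBoxBlock (labels : String) : String :=
  "  { node [shape=box, style=filled, fillcolor=\"#F0F6FF\"]; " ++ labels ++ "; }"

def pvEllipseBlock (labels : String) : String :=
  "  { node [shape=ellipse, style=filled, fillcolor=\"#FCF5FF\"]; " ++ labels ++ "; }"

-- (nodes_qm if s.startswith("QM_") else nodes_app).add(s); same for d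
def pvStepA (p : PySem.Set String × PySem.Set String) (e : String × String × String) :
    PySem.Set String × PySem.Set String :=
  let p1 := if pvIsQM e.1 then (PySem.Set.add p.1 e.1, p.2) else (p.1, PySem.Set.add p.2 e.1)
  if pvIsQM e.2.1 then (PySem.Set.add p1.1 e.2.1, p1.2) else (p1.1, PySem.Set.add p1.2 e.2.1)

def edges_to_dot (edges : List (String × String × String)) : String :=
  let p := edges.foldl pvStepA (PySem.Set.empty, PySem.Set.empty)
  let lines := pvHeader
  let lines := if p.1.isEmpty then lines else
    lines ++ [pvBoxBlock (PySem.Str.join " " ((PySem.List.sorted p.1 (fun x => x)).map pvQuote))]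
  let lines := if p.2.isEmpty then lines else
    lines ++ [pvEllipseBlock (PySem.Str.join " " ((PySem.List.sorted p.2 (fun x => x)).map pvQuote))]
  let lines := (PySem.List.sorted edges pvEdgeKey).foldl (fun ls e => ls ++ [pvEdgeLine e]) lines
  PySem.Str.join "\n" (lines ++ ["}"])

-- ===== PORT B =====
-- if n != prev: (box if n.startswith("QM_") else ell).append(f'"{n}"'); prev = n
def pvStepC (st : (List String × List String) × Option String) (n : String) :
    (List String × List String) × Option String :=
  if some n ≠ st.2 then
    ((if pvIsQM n then (st.1.1 ++ [pvQuote n], st.1.2) else (st.1.1, st.1.2 ++ [pvQuote n])), some n)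
  else st

def edges_to_dot_alt (edges : List (String × String × String)) : String :=
  let endpoints := PySem.List.sorted (edges.flatMap (fun e => [e.1, e.2.1])) (fun x => x)
  let st := endpoints.foldl pvStepC (([], []), none)
  let out := "digraph MQ {\n  rankdir=LR;\n  node [fontsize=9];"
  let out := if st.1.1.isEmpty then out else
    out ++ "\n  { node [shape=box, style=filled, fillcolor=\"#F0F6FF\"]; "
        ++ PySem.Str.join " " st.1.1 ++ "; }"
  let out := if st.1.2.isEmpty then out else
    out ++ "\n  { node [shape=ellipse, style=filled, fillcolor=\"#FCF5FF\"]; "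
        ++ PySem.Str.join " " st.1.2 ++ "; }"
  let out := (PySem.List.sorted edges pvEdgeKey).foldl (fun acc e => acc ++ "\n" ++ pvEdgeLine e) out
  out ++ "\n}"

-- ===== PRECONDITION & SPEC =====
def Spec_edges_to_dot (edges : List (String × String × String)) (out : String) : Prop := out = edges_to_dot_alt edges
instance (edges : List (String × String × String)) (out : String) : Decidable (Spec_edges_to_dot edges out) := by unfold Spec_edges_to_dot; infer_instance

-- ===== CLAIM (what is proved, stated in full; the proofs are below) =====
def Claim_equal_edges_to_dot : Prop := ∀ (edges : List (String × String × String)), Dom_edges_to_dot edges → Spec_edges_to_dot edges (edges_to_dot edges)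


-- ===== LEMMAS AND PROOFS =====

-- single-set / straight-partition vocabulary relating the two ports (proof-only)
def pvStepB (ns : PySem.Set String) (e : String × String × String) : PySem.Set String :=
  PySem.Set.add (PySem.Set.add ns e.1) e.2.1

def pvStepP (pr : List String × List String) (n : String) : List String × List String :=
  if pvIsQM n then (pr.1 ++ [pvQuote n], pr.2) else (pr.1, pr.2 ++ [pvQuote n])

def pvDedupAdj : Option String → List String → List String
  | _, [] => []
  | prev, n :: t => if some n = prev then pvDedupAdj prev t else n :: pvDedupAdj (some n) t

-- B's scan is the straight partition of the adjacent-dedupe of its input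
theorem pv_scan_eq (L : List String) : ∀ (prev : Option String) (pr : List String × List String),
    (L.foldl pvStepC (pr, prev)).1 = (pvDedupAdj prev L).foldl pvStepP pr := by
  induction L with
  | nil => intro prev pr; simp [pvDedupAdj]
  | cons n t ih =>
      intro prev pr
      by_cases h : some n = prev
      · simp [pvDedupAdj, h, pvStepC, ih]
      · simp [pvDedupAdj, h, pvStepC, pvStepP, ih]

theorem pv_mem_dedupAdj (L : List String) : ∀ (prev : Option String),
    L.Pairwise (· ≤ ·) → (∀ p, prev = some p → ∀ y ∈ L, p ≤ y) →
    ∀ x, x ∈ pvDedupAdj prev L ↔ x ∈ L ∧ some x ≠ prev := by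
  induction L with
  | nil => intro prev _ _ x; simp [pvDedupAdj]
  | cons n t ih =>
      intro prev hp hlow x
      have hle : ∀ y ∈ t, n ≤ y := (List.pairwise_cons.mp hp).1
      have hpt : t.Pairwise (· ≤ ·) := (List.pairwise_cons.mp hp).2
      by_cases h : some n = prev
      · have hx := ih prev hpt (fun p hpv y hy => hlow p hpv y (List.mem_cons_of_mem _ hy)) x
        simp only [pvDedupAdj, if_pos h, hx, List.mem_cons]
        constructor
        · rintro ⟨hy, hne⟩; exact ⟨Or.inr hy, hne⟩
        · rintro ⟨hy | hy, hne⟩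
          · subst hy; exact absurd h hne
          · exact ⟨hy, hne⟩
      · have hx := ih (some n) hpt (fun p hpv y hy => by cases hpv; exact hle y hy) x
        simp only [pvDedupAdj, if_neg h, List.mem_cons, hx]
        constructor
        · rintro (rfl | ⟨hy, hne⟩)
          · exact ⟨Or.inl rfl, h⟩
          · refine ⟨Or.inr hy, ?_⟩
            intro hc
            rcases prev with _ | p
            · simp at hc
            · have hxp : x = p := by injection hc
              have h1 : p ≤ n := hlow p rfl n (List.mem_cons_self ..)
              have h2 : n ≤ x := hle x hy
              have hpn : p ≠ n := fun e => h (by rw [e])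
              have hlt : p < x := lt_of_lt_of_le (lt_of_le_of_ne h1 hpn) h2
              exact (ne_of_lt hlt) hxp.symm
        · rintro ⟨rfl | hy, hne⟩
          · exact Or.inl rfl
          · by_cases hxn : x = n
            · exact Or.inl hxn
            · exact Or.inr ⟨hy, by simpa using hxn⟩

theorem pv_dedupAdj_pairwise (L : List String) : ∀ (prev : Option String),
    L.Pairwise (· ≤ ·) → (∀ p, prev = some p → ∀ y ∈ L, p ≤ y) →
    (pvDedupAdj prev L).Pairwise (· < ·) := by
  induction L with
  | nil => intro prev _ _; simp [pvDedupAdj]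
  | cons n t ih =>
      intro prev hp hlow
      have hle : ∀ y ∈ t, n ≤ y := (List.pairwise_cons.mp hp).1
      have hpt : t.Pairwise (· ≤ ·) := (List.pairwise_cons.mp hp).2
      by_cases h : some n = prev
      · simpa [pvDedupAdj, h] using
          ih prev hpt (fun p hpv y hy => hlow p hpv y (List.mem_cons_of_mem _ hy))
      · have hlow' : ∀ p, (some n : Option String) = some p → ∀ y ∈ t, p ≤ y :=
          fun p hpv y hy => by cases hpv; exact hle y hy
        have htail := ih (some n) hpt hlow'
        simp only [pvDedupAdj, if_neg h, List.pairwise_cons]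
        refine ⟨fun y hy => ?_, htail⟩
        have := (pv_mem_dedupAdj t (some n) hpt hlow' y).mp hy
        exact lt_of_le_of_ne (hle y this.1) (fun hny => this.2 (by rw [hny]))

-- adjacent-dedupe of sorted(list) is sorted(set(list))
theorem pv_dedup_sorted (M : List String) :
    pvDedupAdj none (PySem.List.sorted M (fun x => x)) =
      PySem.List.sorted (PySem.Set.ofList M) (fun x => x) := by
  have hp : (PySem.List.sorted M (fun x => x)).Pairwise (· ≤ ·) :=
    PySem.List.sorted_pairwise M (fun x => x)
  have hlow : ∀ p : String, (none : Option String) = some p →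
      ∀ y ∈ PySem.List.sorted M (fun x => x), p ≤ y := by intro p hpv; cases hpv
  have hlt := pv_dedupAdj_pairwise (PySem.List.sorted M (fun x => x)) none hp hlow
  refine (PySem.List.sorted_eq_of_perm_of_pairwise_lt _ _ _ ?_ hlt).symm
  have hnd : (pvDedupAdj none (PySem.List.sorted M (fun x => x))).Nodup :=
    hlt.imp ne_of_lt
  refine (List.perm_ext_iff_of_nodup hnd (PySem.Set.nodup_ofList M)).mpr (fun x => ?_)
  rw [pv_mem_dedupAdj _ none hp hlow x, PySem.Set.mem_ofList, PySem.List.mem_sorted]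
  simp

-- the straight partition computes the two filtered-and-quoted groups
theorem pv_partition_fold (L : List String) :
    ∀ a b : List String,
      L.foldl pvStepP (a, b) =
        (a ++ (L.filter pvIsQM).map pvQuote,
         b ++ (L.filter (fun n => !pvIsQM n)).map pvQuote) := by
  induction L with
  | nil => intro a b; simp
  | cons n ns ih =>
      intro a b
      by_cases h : pvIsQM n
      · simp [pvStepP, h, ih, List.append_assoc]
      · simp [pvStepP, h, ih, List.append_assoc]

-- ===== A-side: the two branched sets are the prefix-split of the one set =====
theorem pv_filter_add_of_pos (p : String → Bool) (N : PySem.Set String) (x : String)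
    (h : p x = true) :
    (PySem.Set.add N x).filter p = PySem.Set.add (N.filter p) x ∧
    (PySem.Set.add N x).filter (fun n => !p n) = N.filter (fun n => !p n) := by
  by_cases hx : x ∈ N
  · have h1 : PySem.Set.add N x = N := by simp [PySem.Set.add, hx]
    have h2 : PySem.Set.add (N.filter p) x = N.filter p := by
      have : x ∈ N.filter p := List.mem_filter.mpr ⟨hx, h⟩
      simp [PySem.Set.add, this]
    simp [h1, h2]
  · have h1 : PySem.Set.add N x = N ++ [x] := by simp [PySem.Set.add, hx]
    have h2 : PySem.Set.add (N.filter p) x = N.filter p ++ [x] := by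
      have : x ∉ N.filter p := fun hm => hx (List.mem_filter.mp hm).1
      simp [PySem.Set.add, this]
    simp [h1, h2, List.filter_append, h]

theorem pv_filter_add_of_neg (p : String → Bool) (N : PySem.Set String) (x : String)
    (h : p x = false) :
    (PySem.Set.add N x).filter p = N.filter p ∧
    (PySem.Set.add N x).filter (fun n => !p n) = PySem.Set.add (N.filter (fun n => !p n)) x := by
  have := pv_filter_add_of_pos (fun n => !p n) N x (by simp [h])
  constructor
  · have h2 := this.2
    simpa using h2
  · exact this.1

theorem pv_stepA_split (N : PySem.Set String) (e : String × String × String) :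
    pvStepA (N.filter pvIsQM, N.filter (fun n => !pvIsQM n)) e =
      ((pvStepB N e).filter pvIsQM, (pvStepB N e).filter (fun n => !pvIsQM n)) := by
  unfold pvStepA pvStepB
  by_cases h1 : pvIsQM e.1
  · have a1 := pv_filter_add_of_pos pvIsQM N e.1 h1
    by_cases h2 : pvIsQM e.2.1
    · have a2 := pv_filter_add_of_pos pvIsQM (PySem.Set.add N e.1) e.2.1 h2
      simp [h1, h2, a1.1, a1.2, a2.1, a2.2]
    · have a2 := pv_filter_add_of_neg pvIsQM (PySem.Set.add N e.1) e.2.1 (by simpa using h2)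
      simp [h1, h2, a1.1, a1.2, a2.1, a2.2]
  · have a1 := pv_filter_add_of_neg pvIsQM N e.1 (by simpa using h1)
    by_cases h2 : pvIsQM e.2.1
    · have a2 := pv_filter_add_of_pos pvIsQM (PySem.Set.add N e.1) e.2.1 h2
      simp [h1, h2, a1.1, a1.2, a2.1, a2.2]
    · have a2 := pv_filter_add_of_neg pvIsQM (PySem.Set.add N e.1) e.2.1 (by simpa using h2)
      simp [h1, h2, a1.1, a1.2, a2.1, a2.2]

theorem pv_collect_split (edges : List (String × String × String)) :
    ∀ N : PySem.Set String,
      edges.foldl pvStepA (N.filter pvIsQM, N.filter (fun n => !pvIsQM n)) =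
        ((edges.foldl pvStepB N).filter pvIsQM,
         (edges.foldl pvStepB N).filter (fun n => !pvIsQM n)) := by
  induction edges with
  | nil => intro N; simp
  | cons e es ih =>
      intro N
      simp only [List.foldl_cons, pv_stepA_split N e]
      exact ih (pvStepB N e)

-- folding both endpoints of each edge = folding the flattened endpoint list
theorem pv_B_eq_ofList (edges : List (String × String × String)) :
    ∀ N : PySem.Set String,
      edges.foldl pvStepB N =
        (edges.flatMap (fun e => [e.1, e.2.1])).foldl PySem.Set.add N := by
  induction edges with
  | nil => intro N; simp
  | cons e es ih => intro N; simp [pvStepB, ih]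

theorem pv_sorted_pairwise_lt (xs : List String) (h : xs.Nodup) :
    (PySem.List.sorted xs (fun x => x)).Pairwise (· < ·) := by
  have hle := PySem.List.sorted_pairwise xs (fun x => x)
  have hne : (PySem.List.sorted xs (fun x => x)).Nodup :=
    (PySem.List.sorted_perm xs (fun x => x) false).nodup_iff.mpr h
  exact (hle.and hne).imp (fun hx => lt_of_le_of_ne hx.1 hx.2)

theorem pv_sorted_filter (p : String → Bool) (N : List String) (h : N.Nodup) :
    PySem.List.sorted (N.filter p) (fun x => x) =
      (PySem.List.sorted N (fun x => x)).filter p := by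
  apply PySem.List.sorted_eq_of_perm_of_pairwise_lt
  · exact (PySem.List.sorted_perm N (fun x => x) false).filter p
  · exact (pv_sorted_pairwise_lt N h).sublist List.filter_sublist

-- ===== string assembly: "\n".join(lines) vs growing the string by += =====
theorem pv_join_cons_cons (sep p q : String) (rest : List String) :
    PySem.Str.join sep (p :: q :: rest) = p ++ sep ++ PySem.Str.join sep (q :: rest) := by
  apply String.toList_inj.mp
  simp [PySem.Str.toList_join, PySem.Chars.join_cons_cons]

theorem pv_cat_pull (f : String → String) (r : List String) : ∀ a b : String,
    r.foldl (fun acc s => acc ++ f s) (a ++ b) = a ++ r.foldl (fun acc s => acc ++ f s) b := by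
  induction r with
  | nil => intro a b; simp
  | cons s t ih => intro a b; simp only [List.foldl_cons, String.append_assoc, ih]

theorem pv_join_foldl (t : List String) : ∀ h : String,
    PySem.Str.join "\n" (h :: t) = t.foldl (fun a s => a ++ "\n" ++ s) h := by
  induction t with
  | nil =>
      intro h
      apply String.toList_inj.mp
      simp [PySem.Str.toList_join, PySem.Chars.join_singleton]
  | cons q r ih =>
      intro h
      rw [pv_join_cons_cons, ih q, List.foldl_cons]
      have := pv_cat_pull (fun s => "\n" ++ s) r (h ++ "\n") q
      simp only [String.append_assoc] at this ⊢
      exact this.symm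

-- literal-splitting facts used to align A's joined lines with B's concatenations
theorem pv_s0 : List.foldl (fun a s => a ++ "\n" ++ s) "digraph MQ {"
    ["  rankdir=LR;", "  node [fontsize=9];"] =
    "digraph MQ {\n  rankdir=LR;\n  node [fontsize=9];" := rfl

theorem pv_box_str (s lbl : String) :
    s ++ "\n" ++ pvBoxBlock lbl =
      s ++ "\n  { node [shape=box, style=filled, fillcolor=\"#F0F6FF\"]; " ++ lbl ++ "; }" := by
  simp only [pvBoxBlock, String.append_assoc]
  congr 1

theorem pv_ell_str (s lbl : String) :
    s ++ "\n" ++ pvEllipseBlock lbl =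
      s ++ "\n  { node [shape=ellipse, style=filled, fillcolor=\"#FCF5FF\"]; " ++ lbl ++ "; }" := by
  simp only [pvEllipseBlock, String.append_assoc]
  congr 1

-- the common tail: joined header/blocks/edge lines/"}" vs the concatenation chain
theorem pv_core (mid : List String) (E : List (String × String × String)) (s : String)
    (hs : s = List.foldl (fun a t => a ++ "\n" ++ t) "digraph MQ {"
      (["  rankdir=LR;", "  node [fontsize=9];"] ++ mid)) :
    PySem.Str.join "\n" ((E.foldl (fun ls e => ls ++ [pvEdgeLine e]) (pvHeader ++ mid)) ++ ["}"]) =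
      (E.foldl (fun acc e => acc ++ "\n" ++ pvEdgeLine e) s) ++ "\n}" := by
  rw [PySem.List.foldl_append_singleton_eq_map]
  have hsplit : (pvHeader ++ mid) ++ E.map pvEdgeLine ++ ["}"] =
      "digraph MQ {" :: ((["  rankdir=LR;", "  node [fontsize=9];"] ++ mid)
        ++ E.map pvEdgeLine ++ ["}"]) := by
    simp [pvHeader]
  rw [hsplit, pv_join_foldl, List.foldl_append, List.foldl_append, ← hs]
  rw [List.foldl_map]
  rw [show ("\n}" : String) = "\n" ++ "}" from rfl]
  simp [String.append_assoc]

-- ===== VERDICT (by name: the statement is the Claim_ definition above) =====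
theorem edges_to_dot_spec : Claim_equal_edges_to_dot := by
  intro edges _
  unfold Spec_edges_to_dot edges_to_dot edges_to_dot_alt
  have hN : (PySem.Set.ofList (edges.flatMap (fun e => [e.1, e.2.1]))).Nodup :=
    PySem.Set.nodup_ofList _
  have h1 : edges.foldl pvStepB PySem.Set.empty =
      PySem.Set.ofList (edges.flatMap (fun e => [e.1, e.2.1])) := by
    rw [PySem.Set.ofList_eq_foldl]
    exact pv_B_eq_ofList edges PySem.Set.empty
  have hA : edges.foldl pvStepA (PySem.Set.empty, PySem.Set.empty) =
      ((PySem.Set.ofList (edges.flatMap (fun e => [e.1, e.2.1]))).filter pvIsQM,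
       (PySem.Set.ofList (edges.flatMap (fun e => [e.1, e.2.1]))).filter (fun n => !pvIsQM n)) := by
    have h2 := pv_collect_split edges PySem.Set.empty
    simp only [PySem.Set.empty] at h1
    simpa [PySem.Set.empty, h1] using h2
  have hB : ((PySem.List.sorted (edges.flatMap (fun e => [e.1, e.2.1])) (fun x => x)).foldl
        pvStepC (([], []), none)).1 =
      (((PySem.List.sorted (PySem.Set.ofList (edges.flatMap (fun e => [e.1, e.2.1])))
          (fun x => x)).filter pvIsQM).map pvQuote,
       ((PySem.List.sorted (PySem.Set.ofList (edges.flatMap (fun e => [e.1, e.2.1])))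
          (fun x => x)).filter (fun n => !pvIsQM n)).map pvQuote) := by
    rw [pv_scan_eq, pv_dedup_sorted, pv_partition_fold]
    simp
  have hq : PySem.List.sorted
      ((PySem.Set.ofList (edges.flatMap (fun e => [e.1, e.2.1]))).filter pvIsQM) (fun x => x) =
      (PySem.List.sorted (PySem.Set.ofList (edges.flatMap (fun e => [e.1, e.2.1])))
        (fun x => x)).filter pvIsQM :=
    pv_sorted_filter pvIsQM _ hN
  have ha : PySem.List.sorted
      ((PySem.Set.ofList (edges.flatMap (fun e => [e.1, e.2.1]))).filter
        (fun n => !pvIsQM n)) (fun x => x) =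
      (PySem.List.sorted (PySem.Set.ofList (edges.flatMap (fun e => [e.1, e.2.1])))
        (fun x => x)).filter (fun n => !pvIsQM n) :=
    pv_sorted_filter (fun n => !pvIsQM n) _ hN
  have hE : ∀ p : String → Bool,
      ((PySem.Set.ofList (edges.flatMap (fun e => [e.1, e.2.1]))).filter p).isEmpty =
        (((PySem.List.sorted (PySem.Set.ofList (edges.flatMap (fun e => [e.1, e.2.1])))
            (fun x => x)).filter p).map pvQuote).isEmpty := by
    intro p
    rw [Bool.eq_iff_iff]
    simp only [List.isEmpty_iff, List.map_eq_nil_iff, List.filter_eq_nil_iff]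
    constructor
    · intro h x hx
      exact h x ((PySem.List.mem_sorted _ (fun x => x) false x).mp hx)
    · intro h x hx
      exact h x ((PySem.List.mem_sorted _ (fun x => x) false x).mpr hx)
  simp only [hA, hB, hq, ha, hE]
  by_cases hbx : (List.map pvQuote (List.filter pvIsQM
      (PySem.List.sorted (PySem.Set.ofList (List.flatMap (fun e => [e.1, e.2.1]) edges))
        (fun x => x)))).isEmpty = true
  · by_cases hel : (List.map pvQuote (List.filter (fun n => !pvIsQM n)
        (PySem.List.sorted (PySem.Set.ofList (List.flatMap (fun e => [e.1, e.2.1]) edges))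
          (fun x => x)))).isEmpty = true
    · simp only [hbx, hel, if_pos]
      exact pv_core [] _ _ pv_s0.symm
    · simp only [hbx, hel, if_pos, if_neg, Bool.false_eq_true, not_false_iff]
      refine pv_core [pvEllipseBlock _] _ _ ?_
      rw [List.foldl_append, pv_s0, List.foldl_cons, List.foldl_nil, pv_ell_str]
  · by_cases hel : (List.map pvQuote (List.filter (fun n => !pvIsQM n)
        (PySem.List.sorted (PySem.Set.ofList (List.flatMap (fun e => [e.1, e.2.1]) edges))
          (fun x => x)))).isEmpty = true
    · simp only [hbx, hel, if_pos, if_neg, Bool.false_eq_true, not_false_iff]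
      refine pv_core [pvBoxBlock _] _ _ ?_
      rw [List.foldl_append, pv_s0, List.foldl_cons, List.foldl_nil, pv_box_str]
    · simp only [hbx, hel, if_neg, Bool.false_eq_true, not_false_iff]
      rw [List.append_assoc]
      refine pv_core _ _ _ ?_
      rw [← List.append_assoc, List.foldl_append, List.foldl_append, pv_s0,
        List.foldl_cons, List.foldl_nil, List.foldl_cons, List.foldl_nil,
        pv_box_str, pv_ell_str]
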